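-- pv_equiv track=rewrite | github.com/DatHydroGuy/QRCode | QrCodeDisplay.py | count_condition1_row_penalties
-- ===== SOURCE A (Python) =====
-- def count_condition1_row_penalties(matrix):
--     penalties = 0
--     for row in matrix:
--         row_penalties = 0
--         curr_val = row[0]
--         val_count = 1
--         for col in range(1, len(matrix[0])):
--             if row[col] == curr_val:
--                 val_count += 1
--             else:
--                 if val_count >= 5:
--                     row_penalties += val_count - 2
--                 curr_val = row[col]
--                 val_count = 1
--         if val_count >= 5:
--             row_penalties += val_count - 2
--         penalties += row_penalties
--     return penalties
-- ===== SOURCE B (Python) =====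
-- def count_condition1_row_penalties(matrix):
--     n = len(matrix[0]) if matrix else 0
--     total = 0
--     for row in matrix:
--         for i in range(4, n):
--             if row[i - 4] == row[i - 3] == row[i - 2] == row[i - 1] == row[i]:
--                 if i > 4 and row[i - 5] == row[i]:
--                     total += 1  # the 5-window extends the previous one: run one longer
--                 else:
--                     total += 3  # a new run just reached length 5
--     return total
-- ===== Notes on version B (the rewrite author's own statement) =====
-- stated objective: alternative
-- what changed: Replaces A's run-length state machine (current value + counter with end-of-row flush) by a sliding 5-cell window count: each all-equal window of 5 adds 3 when it starts a run and 1 when it extends the previous window, which totals length-2 per run of length >= 5; no run lengths are ever tracked.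
import Mathlib
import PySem

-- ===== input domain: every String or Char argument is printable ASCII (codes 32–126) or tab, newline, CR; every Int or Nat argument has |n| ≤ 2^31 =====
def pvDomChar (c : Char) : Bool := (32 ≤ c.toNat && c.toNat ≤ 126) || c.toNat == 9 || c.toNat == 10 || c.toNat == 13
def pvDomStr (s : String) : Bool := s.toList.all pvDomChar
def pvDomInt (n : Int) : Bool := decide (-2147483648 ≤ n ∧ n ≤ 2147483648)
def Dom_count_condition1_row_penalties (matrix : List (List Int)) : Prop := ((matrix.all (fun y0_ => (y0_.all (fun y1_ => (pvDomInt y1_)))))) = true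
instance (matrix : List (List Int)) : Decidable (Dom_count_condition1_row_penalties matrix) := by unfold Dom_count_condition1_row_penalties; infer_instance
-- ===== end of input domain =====

-- B replaces A's run-length state machine by a sliding 5-cell window count
-- (3 for a window that starts a run, 1 for a window extending the previous one),
-- never tracking run lengths (objective: alternative algorithm, same cost).

-- ===== PORT A =====
-- state (row_penalties, curr_val, val_count); one step of A's inner loop on cell value v
def pvStepA (s : Int × Int × Int) (v : Int) : Int × Int × Int :=
  if v = s.2.1 then (s.1, s.2.1, s.2.2 + 1)
  else ((if 5 ≤ s.2.2 then s.1 + s.2.2 - 2 else s.1), v, 1)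

def count_condition1_row_penalties (matrix : List (List Int)) : Int :=
  matrix.foldl (fun penalties row =>
    let s := (PySem.List.pyRange 1 (((matrix.headD []).length : Int)) 1).foldl
      (fun s col => pvStepA s (PySem.List.pyGetD row col 0))
      (0, PySem.List.pyGetD row 0 0, 1)
    penalties + (if 5 ≤ s.2.2 then s.1 + s.2.2 - 2 else s.1)) 0

-- ===== PORT B =====
-- one step of B's inner loop at column index i: examine the 5-window row[i-4..i]
def pvStepB (row : List Int) (t : Int) (i : Int) : Int :=
  if PySem.List.pyGetD row (i-4) 0 = PySem.List.pyGetD row (i-3) 0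
     ∧ PySem.List.pyGetD row (i-3) 0 = PySem.List.pyGetD row (i-2) 0
     ∧ PySem.List.pyGetD row (i-2) 0 = PySem.List.pyGetD row (i-1) 0
     ∧ PySem.List.pyGetD row (i-1) 0 = PySem.List.pyGetD row i 0 then
    if 4 < i ∧ PySem.List.pyGetD row (i-5) 0 = PySem.List.pyGetD row i 0
    then t + 1 else t + 3
  else t

def count_condition1_row_penalties_alt (matrix : List (List Int)) : Int :=
  let n : Int := match matrix with | [] => 0 | r :: _ => (r.length : Int)
  matrix.foldl (fun total row =>
    (PySem.List.pyRange 4 n 1).foldl (pvStepB row) total) 0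

-- ===== PRECONDITION & SPEC =====
-- Pre_ excludes exactly the inputs where A raises IndexError: a row that is empty
-- (row[0]) or shorter than len(matrix[0]) (row[col]).
def Pre_count_condition1_row_penalties (matrix : List (List Int)) : Prop :=
  ∀ row ∈ matrix, row ≠ [] ∧ (matrix.headD []).length ≤ row.length
instance (matrix : List (List Int)) : Decidable (Pre_count_condition1_row_penalties matrix) := by unfold Pre_count_condition1_row_penalties; infer_instance
def pvWitness_count_condition1_row_penalties : List (List Int) :=
  [[1, 1, 1, 1, 1], [1, 0, 1, 0, 1]]

def Spec_count_condition1_row_penalties (matrix : List (List Int)) (out : Int) : Prop := out = count_condition1_row_penalties_alt matrix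
instance (matrix : List (List Int)) (out : Int) : Decidable (Spec_count_condition1_row_penalties matrix out) := by unfold Spec_count_condition1_row_penalties; infer_instance

-- ===== CLAIM (what is proved, stated in full; the proofs are below) =====
def Claim_equal_count_condition1_row_penalties : Prop := ∀ (matrix : List (List Int)), Dom_count_condition1_row_penalties matrix → Pre_count_condition1_row_penalties matrix → Spec_count_condition1_row_penalties matrix (count_condition1_row_penalties matrix)

-- ===== LEMMAS AND PROOFS =====

-- run list built left-to-right with an open head run (cv, vc): the shape of A's scan
def pvRunsFrom (cv : Int) (vc : Nat) : List Int → List (Int × Nat)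
  | [] => [(cv, vc)]
  | x :: xs => if x = cv then pvRunsFrom cv (vc + 1) xs else (cv, vc) :: pvRunsFrom x 1 xs

def pvPenOf (l : List (Int × Nat)) : Int :=
  (l.map (fun p => if 5 ≤ p.2 then (p.2 : Int) - 2 else 0)).sum

-- contribution of the window ending at a cell whose run-streak there has length k
def pvH (k : Nat) : Int := if k = 5 then 3 else if 6 ≤ k then 1 else 0

-- B's remaining count given current streak value cv of length m, over the rest of the row
def pvWin : Int → Nat → List Int → Int
  | _, _, [] => 0
  | cv, m, x :: xs => if x = cv then pvH (m + 1) + pvWin cv (m + 1) xs else pvWin x 1 xs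

-- the common per-row value both programs compute
def pvRowPen (n : Nat) (row : List Int) : Int :=
  match row.take n with
  | [] => 0
  | x :: xs => pvPenOf (pvRunsFrom x 1 xs)

lemma pvPenOf_nil : pvPenOf [] = 0 := rfl

lemma pvPenOf_cons (p : Int × Nat) (l : List (Int × Nat)) :
    pvPenOf (p :: l) = (if 5 ≤ p.2 then (p.2 : Int) - 2 else 0) + pvPenOf l := by
  simp [pvPenOf]

lemma pvScanA_eq (rest : List Int) : ∀ (rp cv : Int) (vc : Nat),
    (if 5 ≤ (rest.foldl pvStepA (rp, cv, ((vc : Int) + 1))).2.2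
      then (rest.foldl pvStepA (rp, cv, ((vc : Int) + 1))).1
            + (rest.foldl pvStepA (rp, cv, ((vc : Int) + 1))).2.2 - 2
      else (rest.foldl pvStepA (rp, cv, ((vc : Int) + 1))).1)
    = rp + pvPenOf (pvRunsFrom cv (vc + 1) rest) := by
  induction rest with
  | nil =>
    intro rp cv vc
    simp only [List.foldl, pvRunsFrom, pvPenOf_cons, pvPenOf_nil]
    split_ifs with h1 h2 h2 <;> push_cast at * <;> omega
  | cons x xs ih =>
    intro rp cv vc
    simp only [List.foldl, pvStepA, pvRunsFrom]
    by_cases hx : x = cv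
    · simp only [hx, reduceIte]
      have h1 := ih rp cv (vc + 1)
      push_cast at h1 ⊢
      exact h1
    · simp only [if_neg hx]
      have h1 := ih (if 5 ≤ (vc : Int) + 1 then rp + ((vc : Int) + 1) - 2 else rp) x 0
      push_cast at h1 ⊢
      rw [h1, pvPenOf_cons]
      split_ifs with h2 h3 h3 <;> push_cast at * <;> ring_nf <;> omega

-- penalty of a short open run is 0
lemma pvPen_small (rest : List Int) : ∀ (cv : Int) (m : Nat), 1 ≤ m →
    m + rest.length ≤ 4 → pvPenOf (pvRunsFrom cv m rest) = 0 := by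
  induction rest with
  | nil =>
    intro cv m hm h
    simp only [pvRunsFrom, pvPenOf_cons, pvPenOf_nil]
    rw [if_neg (by omega)]
    ring
  | cons x xs ih =>
    intro cv m hm h
    simp only [List.length_cons] at h
    simp only [pvRunsFrom]
    by_cases hx : x = cv
    · rw [if_pos hx]
      exact ih cv (m + 1) (by omega) (by omega)
    · rw [if_neg hx, pvPenOf_cons, if_neg (by omega), ih x 1 (by omega) (by omega)]
      ring

-- B's window count of the remaining row equals the remaining run penalties
lemma pvWin_runs (rest : List Int) : ∀ (cv : Int) (m : Nat), 1 ≤ m →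
    pvWin cv m rest + (if 5 ≤ m then (m : Int) - 2 else 0)
      = pvPenOf (pvRunsFrom cv m rest) := by
  induction rest with
  | nil =>
    intro cv m hm
    simp only [pvWin, pvRunsFrom, pvPenOf_cons, pvPenOf_nil]
    ring
  | cons x xs ih =>
    intro cv m hm
    simp only [pvWin, pvRunsFrom]
    by_cases hx : x = cv
    · rw [if_pos hx, if_pos hx, ← ih cv (m + 1) (by omega)]
      have : pvH (m + 1) + (if 5 ≤ m then (m : Int) - 2 else 0)
          = (if 5 ≤ m + 1 then ((m + 1 : Nat) : Int) - 2 else 0) := by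
        unfold pvH
        split_ifs <;> push_cast at * <;> omega
      omega
    · rw [if_neg hx, if_neg hx, pvPenOf_cons, ← ih x 1 (by omega)]
      simp only []
      rw [if_neg (show ¬ 5 ≤ 1 by omega)]
      ring

-- the inner-loop invariant for B: at index i the maximal equal streak ending at i-1
-- has value cv and length m; then the fold from i counts pvWin cv m of the rest
lemma pvB_step : ∀ (k : Nat) (row : List Int) (n i m : Nat) (cv acc : Int),
    n ≤ row.length → k = n - i → 4 ≤ i → 1 ≤ m → m ≤ i → i ≤ n →
    (∀ j, j < m → row.getD (i - 1 - j) 0 = cv) →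
    (m = i ∨ row.getD (i - 1 - m) 0 ≠ cv) →
    (PySem.List.pyRange (i : Int) (n : Int) 1).foldl (pvStepB row) acc
      = acc + pvWin cv m ((row.take n).drop i) := by
  intro k
  induction k with
  | zero =>
    intro row n i m cv acc hn hk h4 hm1 hmi hin hinv hmax
    have hi : i = n := by omega
    subst hi
    rw [PySem.List.pyRange_one_eq_nil (by omega)]
    rw [List.drop_eq_nil_of_le (List.length_take_le ..)]
    simp [pvWin]
  | succ k ih =>
    intro row n i m cv acc hn hk h4 hm1 hmi hin hinv hmax
    have hilt : i < n := by omega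
    have hirow : i < row.length := by omega
    have hx : row.getD i 0 = row[i] := List.getD_eq_getElem row 0 hirow
    have hgi1 : row.getD (i - 1) 0 = cv := by
      have := hinv 0 (by omega); simpa using this
    -- peel index i off the range
    rw [PySem.List.pyRange_one_cons (by exact_mod_cast hilt)]
    simp only [List.foldl]
    -- the dropped suffix starts with row[i]
    have hdrop : (row.take n).drop i = row[i] :: (row.take n).drop (i + 1) := by
      rw [List.drop_eq_getElem_cons (by simp [List.length_take]; omega)]
      congr 1
      exact List.getElem_take
    -- cast the five indices of the window to Nat
    have e4 : (i : Int) - 4 = ((i - 4 : Nat) : Int) := by omega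
    have e3 : (i : Int) - 3 = ((i - 3 : Nat) : Int) := by omega
    have e2 : (i : Int) - 2 = ((i - 2 : Nat) : Int) := by omega
    have e1 : (i : Int) - 1 = ((i - 1 : Nat) : Int) := by omega
    have hstep : pvStepB row acc (i : Int)
        = acc + (if row[i] = cv then pvH (m + 1) else 0) := by
      unfold pvStepB
      rw [e4, e3, e2, e1]
      simp only [PySem.List.pyGetD_natCast]
      by_cases hxc : row[i] = cv
      · have hci : row.getD i 0 = cv := by rw [hx, hxc]
        by_cases hm4 : 4 ≤ m
        · -- window all-equal
          have hg2 : row.getD (i - 2) 0 = cv := by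
            have := hinv 1 (by omega)
            rwa [show i - 1 - 1 = i - 2 from by omega] at this
          have hg3 : row.getD (i - 3) 0 = cv := by
            have := hinv 2 (by omega)
            rwa [show i - 1 - 2 = i - 3 from by omega] at this
          have hg4 : row.getD (i - 4) 0 = cv := by
            have := hinv 3 (by omega)
            rwa [show i - 1 - 3 = i - 4 from by omega] at this
          rw [if_pos ⟨by rw [hg4, hg3], by rw [hg3, hg2], by rw [hg2, hgi1],
              by rw [hgi1, hci]⟩]
          rw [if_pos hxc]
          by_cases hm5 : 5 ≤ m
          · have hg5 : row.getD (i - 5) 0 = cv := by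
              have := hinv 4 (by omega)
              rwa [show i - 1 - 4 = i - 5 from by omega] at this
            rw [if_pos ⟨by exact_mod_cast (by omega : 4 < i),
                by rw [show (i : Int) - 5 = ((i - 5 : Nat) : Int) from by omega,
                    PySem.List.pyGetD_natCast, hg5, hci]⟩]
            unfold pvH
            rw [if_neg (by omega), if_pos (by omega)]
          · -- m = 4: the window starts a run
            have hnotext : ¬ (4 < (i : Int)
                ∧ PySem.List.pyGetD row ((i : Int) - 5) 0 = row.getD i 0) := by
              rintro ⟨hlt, heq⟩
              have hi5 : 5 ≤ i := by exact_mod_cast (by omega : (5:Int) ≤ (i:Int))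
              rw [show (i : Int) - 5 = ((i - 5 : Nat) : Int) from by omega,
                  PySem.List.pyGetD_natCast, hci] at heq
              rcases hmax with hmi' | hne
              · omega
              · rw [show i - 1 - m = i - 5 from by omega] at hne
                exact hne heq
            rw [if_neg hnotext]
            unfold pvH
            rw [if_pos (by omega)]
        · -- m < 4: the window cannot be all-equal
          have hnotw : ¬ (row.getD (i-4) 0 = row.getD (i-3) 0
              ∧ row.getD (i-3) 0 = row.getD (i-2) 0
              ∧ row.getD (i-2) 0 = row.getD (i-1) 0
              ∧ row.getD (i-1) 0 = row.getD i 0) := by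
            rintro ⟨w43, w32, w21, w10⟩
            have c1 : row.getD (i - 1) 0 = cv := hgi1
            have c2 : row.getD (i - 2) 0 = cv := w21.trans c1
            have c3 : row.getD (i - 3) 0 = cv := w32.trans c2
            have c4 : row.getD (i - 4) 0 = cv := w43.trans c3
            rcases hmax with hmi' | hne
            · omega
            · have hm123 : m = 1 ∨ m = 2 ∨ m = 3 := by omega
              rcases hm123 with h | h | h <;> subst h
              · rw [show i - 1 - 1 = i - 2 from by omega] at hne
                exact hne c2
              · rw [show i - 1 - 2 = i - 3 from by omega] at hne
                exact hne c3
              · rw [show i - 1 - 3 = i - 4 from by omega] at hne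
                exact hne c4
          rw [if_neg hnotw, if_pos hxc]
          unfold pvH
          rw [if_neg (by omega), if_neg (by omega)]
          ring
      · -- row[i] ≠ cv: the window is broken at its last pair
        have hnotw : ¬ (row.getD (i-4) 0 = row.getD (i-3) 0
            ∧ row.getD (i-3) 0 = row.getD (i-2) 0
            ∧ row.getD (i-2) 0 = row.getD (i-1) 0
            ∧ row.getD (i-1) 0 = row.getD i 0) := by
          rintro ⟨_, _, _, w10⟩
          exact hxc (by rw [← hx, ← w10, hgi1])
        rw [if_neg hnotw, if_neg hxc]
        ring
    rw [show (i : Int) + 1 = ((i + 1 : Nat) : Int) from by push_cast; ring]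
    by_cases hxc : row[i] = cv
    · have hrec := ih row n (i + 1) (m + 1) cv (pvStepB row acc (i : Int)) hn (by omega)
        (by omega) (by omega) (by omega) (by omega)
        (by
          intro j hj
          rcases Nat.eq_zero_or_pos j with hj0 | hjp
          · subst hj0
            rw [show i + 1 - 1 - 0 = i from by omega, hx, hxc]
          · have := hinv (j - 1) (by omega)
            rwa [show i + 1 - 1 - j = i - 1 - (j - 1) from by omega])
        (by
          rcases hmax with hmi' | hne
          · left; omega
          · right
            rwa [show i + 1 - 1 - (m + 1) = i - 1 - m from by omega])
      rw [hrec, hstep, hdrop]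
      simp only [pvWin, if_pos hxc]
      ring
    · have hrec := ih row n (i + 1) 1 row[i] (pvStepB row acc (i : Int)) hn (by omega)
        (by omega) (by omega) (by omega) (by omega)
        (by
          intro j hj
          have hj0 : j = 0 := by omega
          subst hj0
          rw [show i + 1 - 1 - 0 = i from by omega, hx])
        (by
          right
          rw [show i + 1 - 1 - 1 = i - 1 from by omega, hgi1]
          exact fun h => hxc h.symm)
      rw [hrec, hstep, hdrop]
      simp only [pvWin, if_neg hxc]
      ring

-- per-row value of B's inner loop
lemma pvB_row (row : List Int) (n : Nat) (hn : n ≤ row.length) (acc : Int) :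
    (PySem.List.pyRange 4 (n : Int) 1).foldl (pvStepB row) acc
      = acc + pvRowPen n row := by
  by_cases h5 : n ≤ 4
  · rw [PySem.List.pyRange_one_eq_nil (by omega)]
    rcases htake : row.take n with _ | ⟨x, xs⟩
    · have : pvRowPen n row = 0 := by unfold pvRowPen; rw [htake]
      rw [List.foldl_nil, this, add_zero]
    · have hlen : xs.length + 1 ≤ 4 := by
        have h := List.length_take_le n row
        rw [htake] at h
        simp at h
        omega
      have : pvRowPen n row = pvPenOf (pvRunsFrom x 1 xs) := by
        unfold pvRowPen; rw [htake]
      rw [List.foldl_nil, this, pvPen_small xs x 1 (by omega) (by omega), add_zero]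
  · obtain ⟨m', rfl⟩ : ∃ m', n = m' + 5 := ⟨n - 5, by omega⟩
    match row, hn with
    | a :: b :: c :: d :: rest, hn =>
      have g0 : (a :: b :: c :: d :: rest).getD 0 0 = a := rfl
      have g1 : (a :: b :: c :: d :: rest).getD 1 0 = b := rfl
      have g2 : (a :: b :: c :: d :: rest).getD 2 0 = c := rfl
      have g3 : (a :: b :: c :: d :: rest).getD 3 0 = d := rfl
      have hq : (((a :: b :: c :: d :: rest).take (m' + 5)).drop 4)
          = rest.take (m' + 1) := by
        simp [List.take_succ_cons]
      have hrp : pvRowPen (m' + 5) (a :: b :: c :: d :: rest)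
          = pvWin a 1 (b :: c :: d :: rest.take (m' + 1)) := by
        unfold pvRowPen
        simp only [List.take_succ_cons]
        rw [← pvWin_runs _ a 1 (by omega)]
        norm_num
      by_cases h1 : d = c
      · by_cases h2 : c = b
        · by_cases h3 : b = a
          · -- initial streak of length 4
            have hb := pvB_step (m' + 1) _ (m' + 5) 4 4 d acc hn (by omega) (by omega)
              (by omega) (by omega) (by omega)
              (by
                intro j hj
                interval_cases j
                · exact g3
                · rw [show (3:Nat) - 1 = 2 from rfl, g2]; exact h1.symm
                · rw [show (3:Nat) - 2 = 1 from rfl, g1]; exact (h1.trans h2).symm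
                · rw [show (3:Nat) - 3 = 0 from rfl, g0]
                  exact ((h1.trans h2).trans h3).symm)
              (Or.inl rfl)
            rw [hq, show ((4 : Nat) : Int) = (4 : Int) from by norm_num] at hb
            rw [hb, hrp]
            subst h1; subst h2; subst h3
            simp [pvWin, pvH]
          · -- initial streak of length 3
            have hb := pvB_step (m' + 1) _ (m' + 5) 4 3 d acc hn (by omega) (by omega)
              (by omega) (by omega) (by omega)
              (by
                intro j hj
                interval_cases j
                · exact g3
                · rw [show (3:Nat) - 1 = 2 from rfl, g2]; exact h1.symm
                · rw [show (3:Nat) - 2 = 1 from rfl, g1]; exact (h1.trans h2).symm)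
              (by
                right
                rw [show (3:Nat) - 3 = 0 from rfl, g0]
                exact fun ha => h3 (ha.trans (h1.trans h2)).symm)
            rw [hq, show ((4 : Nat) : Int) = (4 : Int) from by norm_num] at hb
            rw [hb, hrp]
            subst h1; subst h2
            simp [pvWin, pvH, h3]
        · -- initial streak of length 2
          have hb := pvB_step (m' + 1) _ (m' + 5) 4 2 d acc hn (by omega) (by omega)
            (by omega) (by omega) (by omega)
            (by
              intro j hj
              interval_cases j
              · exact g3
              · rw [show (3:Nat) - 1 = 2 from rfl, g2]; exact h1.symm)
            (by
              right
              rw [show (3:Nat) - 2 = 1 from rfl, g1]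
              exact fun hb0 => h2 (hb0.trans h1).symm)
          rw [hq, show ((4 : Nat) : Int) = (4 : Int) from by norm_num] at hb
          rw [hb, hrp]
          subst h1
          by_cases h3 : b = a
          · subst h3
            simp [pvWin, pvH, h2]
          · simp [pvWin, pvH, h2, h3]
      · -- initial streak of length 1
        have hb := pvB_step (m' + 1) _ (m' + 5) 4 1 d acc hn (by omega) (by omega)
          (by omega) (by omega) (by omega)
          (by intro j hj; interval_cases j; exact g3)
          (by
            right
            rw [show (3:Nat) - 1 = 2 from rfl, g2]
            exact fun hc => h1 hc.symm)
        rw [hq, show ((4 : Nat) : Int) = (4 : Int) from by norm_num] at hb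
        rw [hb, hrp]
        by_cases h2 : c = b
        · subst h2
          by_cases h3 : c = a
          · subst h3
            simp [pvWin, pvH, h1]
          · simp [pvWin, pvH, h1, h3]
        · by_cases h3 : b = a
          · subst h3
            simp [pvWin, pvH, h1, h2]
          · simp [pvWin, h1, h2, h3]

-- per-row value of A's inner loop
lemma pvA_row (n : Nat) (row : List Int) (acc : Int)
    (h1 : row ≠ []) (h2 : n ≤ row.length) :
    (acc + (if 5 ≤ ((PySem.List.pyRange 1 (n : Int) 1).foldl
        (fun s col => pvStepA s (PySem.List.pyGetD row col 0))
        (0, PySem.List.pyGetD row 0 0, 1)).2.2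
      then ((PySem.List.pyRange 1 (n : Int) 1).foldl
        (fun s col => pvStepA s (PySem.List.pyGetD row col 0))
        (0, PySem.List.pyGetD row 0 0, 1)).1
        + ((PySem.List.pyRange 1 (n : Int) 1).foldl
        (fun s col => pvStepA s (PySem.List.pyGetD row col 0))
        (0, PySem.List.pyGetD row 0 0, 1)).2.2 - 2
      else ((PySem.List.pyRange 1 (n : Int) 1).foldl
        (fun s col => pvStepA s (PySem.List.pyGetD row col 0))
        (0, PySem.List.pyGetD row 0 0, 1)).1))
    = acc + pvRowPen n row := by
  obtain ⟨x, t, rfl⟩ := List.exists_cons_of_ne_nil h1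
  match n, h2 with
  | 0, _ =>
    rw [PySem.List.pyRange_one_eq_nil (by norm_num)]
    have : pvRowPen 0 (x :: t) = 0 := rfl
    rw [this]
    norm_num
  | (m + 1), h2 =>
    have hx0 : PySem.List.pyGetD (x :: t) 0 0 = x := by
      simp [PySem.List.pyGetD, PySem.List.pyIdx?, PySem.List.pyGet?]
    set l : List Int := (x :: t).take (m + 1) with hl
    have hlen' : l.length = m + 1 := by
      rw [hl, List.length_take]
      omega
    have hlen : (l.length : Int) = ((m + 1 : Nat) : Int) := by exact congrArg Nat.cast hlen'
    have hcongr : (PySem.List.pyRange 1 (((m + 1 : Nat) : Int)) 1).foldl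
        (fun s col => pvStepA s (PySem.List.pyGetD (x :: t) col 0)) (0, x, 1)
      = (PySem.List.pyRange 1 (((m + 1 : Nat) : Int)) 1).foldl
        (fun s col => pvStepA s (PySem.List.pyGetD l col 0)) (0, x, 1) := by
      apply PySem.List.foldl_congr_mem
      intro acc col hcol
      rw [PySem.List.mem_pyRange_one] at hcol
      have hcnn : 0 ≤ col := by omega
      have hlt : col < ((x :: t).length : Int) := by
        simp only [List.length_cons] at h2 ⊢
        push_cast
        omega
      have hltl : col < (l.length : Int) := by rw [hlen]; push_cast; omega
      rw [PySem.List.pyGetD_eq_getElem (x :: t) 0 hcnn hlt,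
          PySem.List.pyGetD_eq_getElem l 0 hcnn hltl]
      congr 1
      simp only [hl]
      exact (List.getElem_take).symm
    rw [hx0, hcongr, ← hlen,
        PySem.List.foldl_pyRange_pyGetD' l 0 pvStepA (0, x, 1) (by norm_num : (0:Int) ≤ 1)]
    have hdrop : l.drop (1 : Int).toNat = t.take m := by simp [hl]
    rw [hdrop]
    have hkey := pvScanA_eq (t.take m) 0 x 0
    simp only [Nat.cast_zero, zero_add] at hkey
    rw [hkey]
    have hrp : pvRowPen (m + 1) (x :: t) = pvPenOf (pvRunsFrom x 1 (t.take m)) := by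
      unfold pvRowPen
      simp [List.take_succ_cons]
    rw [hrp]

lemma pvMain (n : Nat) (rows : List (List Int)) :
    ∀ (acc : Int), (∀ row ∈ rows, row ≠ [] ∧ n ≤ row.length) →
    rows.foldl (fun penalties row =>
      let s := (PySem.List.pyRange 1 (n : Int) 1).foldl
        (fun s col => pvStepA s (PySem.List.pyGetD row col 0))
        (0, PySem.List.pyGetD row 0 0, 1)
      penalties + (if 5 ≤ s.2.2 then s.1 + s.2.2 - 2 else s.1)) acc
    = rows.foldl (fun total row =>
        (PySem.List.pyRange 4 (n : Int) 1).foldl (pvStepB row) total) acc := by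
  induction rows with
  | nil => intro acc _; rfl
  | cons r rs ih =>
    intro acc h
    obtain ⟨h1, h2⟩ := h r (List.mem_cons_self ..)
    simp only [List.foldl]
    rw [pvA_row n r acc h1 h2, ← pvB_row r n h2 acc]
    exact ih _ (fun row hm => h row (List.mem_cons_of_mem _ hm))

-- ===== VERDICT (by name: the statement is the Claim_ definition above) =====
theorem count_condition1_row_penalties_spec : Claim_equal_count_condition1_row_penalties := by
  intro matrix _ hpre
  unfold Spec_count_condition1_row_penalties
  unfold count_condition1_row_penalties count_condition1_row_penalties_alt
  cases matrix with
  | nil => rfl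
  | cons r rs =>
    have hm := pvMain r.length (r :: rs) 0 (by
      intro row hmem
      have := hpre row hmem
      simpa using this)
    simpa using hm
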